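-- pv_equiv track=rewrite | github.com/Failjak/leetcode_problems | sliding_window/substrs_size_three_with_dis_char.py | countGoodSubstringsWithStates
-- ===== SOURCE A (Python) =====
-- def countGoodSubstringsWithStates(s: str, sub_len: int = 3) -> int:
--     slen = len(s)
--     state = dict()
--     count = 0
--
--     r = l = 0
--     while r < slen:
--         if state.get(s[r]) is not None:
--             state[s[r]] += 1
--         else:
--             state[s[r]] = 1
--
--         if (r - l + 1) == sub_len:
--             if len(state) == sub_len:
--                 count += 1
--             state[s[l]] -= 1
--             if not state[s[l]]:
--                 state.pop(s[l])
--             l += 1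
--         r += 1
--
--     return count
-- ===== SOURCE B (Python) =====
-- def countGoodSubstringsWithStates(s: str, sub_len: int = 3) -> int:
--     if sub_len <= 0:
--         return 0
--     return sum(1 for i in range(len(s) - sub_len + 1)
--                if len(set(s[i:i + sub_len])) == sub_len)
-- ===== Notes on version B (the rewrite author's own statement) =====
-- stated objective: idiomatic
-- what changed: Replaced the incrementally-maintained sliding-window counter dict (with left/right pointers, decrement and pop) by a direct comprehension that slices each length-sub_len window and tests len(set(window)) == sub_len, with a guard returning 0 for sub_len <= 0 (matching A, whose window-size test never fires there).
import Mathlib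
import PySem

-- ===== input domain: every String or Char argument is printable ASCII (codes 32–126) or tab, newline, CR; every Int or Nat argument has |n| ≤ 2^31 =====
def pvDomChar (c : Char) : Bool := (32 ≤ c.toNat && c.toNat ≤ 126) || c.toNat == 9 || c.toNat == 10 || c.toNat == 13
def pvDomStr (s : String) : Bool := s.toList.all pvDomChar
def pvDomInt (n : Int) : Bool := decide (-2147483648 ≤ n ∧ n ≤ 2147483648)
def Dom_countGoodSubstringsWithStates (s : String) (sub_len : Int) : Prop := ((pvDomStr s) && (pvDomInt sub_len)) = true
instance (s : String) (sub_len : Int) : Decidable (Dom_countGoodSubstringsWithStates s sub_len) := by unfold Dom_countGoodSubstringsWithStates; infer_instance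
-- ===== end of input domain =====

-- B replaces A's incrementally maintained sliding-window counter dict by a per-window
-- slice-and-set distinctness test (idiomatic; not claimed faster).

-- ===== PORT A =====
-- Loop body of A's while-loop (state, count, l are the mutable locals; rc = (r, s[r])).
-- `state[s[r]] += 1` / `= 1` is the get?-guarded modify/insert; `state[s[l]] -= 1` is ported as
-- `modify` with default 0 and s[l] as `(pyGet? cs l).getD ' '`: at that program point l is a
-- valid index and the key is present (the window contains s[l]), so both are exact there.
def pvStepA (cs : List Char) (sub_len : Int)
    (acc : PySem.Dict Char Int × Int × Int) (rc : Int × Char) :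
    PySem.Dict Char Int × Int × Int :=
  let state := acc.1
  let count := acc.2.1
  let l := acc.2.2
  let r := rc.1
  let c := rc.2
  let state := if (state.get? c).isSome then state.modify c 0 (· + 1) else state.insert c 1
  if r - l + 1 == sub_len then
    let count := if ((state.size : Int) == sub_len) then count + 1 else count
    let lc := (PySem.List.pyGet? cs l).getD ' '
    let state := state.modify lc 0 (· - 1)
    let state := if state.getD lc 0 == 0 then state.erase lc else state
    (state, count, l + 1)
  else
    (state, count, l)

-- A: `while r < slen` with r := r + 1 each pass, reading s[r], is the fold over enumerate(s).
def countGoodSubstringsWithStates (s : String) (sub_len : Int) : Int :=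
  let cs := s.toList
  ((PySem.List.enumerate cs).foldl (pvStepA cs sub_len) (PySem.Dict.empty, 0, 0)).2.1

-- ===== PORT B =====
-- sum(1 for i in range(len(s)-sub_len+1) if len(set(s[i:i+sub_len])) == sub_len), guarded for sub_len <= 0.
def countGoodSubstringsWithStates_alt (s : String) (sub_len : Int) : Int :=
  if sub_len ≤ 0 then 0
  else
    let cs := s.toList
    (((PySem.List.pyRange 0 ((cs.length : Int) - sub_len + 1) 1).filter
        (fun i =>
          ((PySem.Set.ofList (PySem.List.slice cs (some i) (some (i + sub_len)))).length : Int)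
            == sub_len)).length : Int)

-- ===== PRECONDITION & SPEC =====
def Spec_countGoodSubstringsWithStates (s : String) (sub_len : Int) (out : Int) : Prop := out = countGoodSubstringsWithStates_alt s sub_len
instance (s : String) (sub_len : Int) (out : Int) : Decidable (Spec_countGoodSubstringsWithStates s sub_len out) := by unfold Spec_countGoodSubstringsWithStates; infer_instance

-- ===== CLAIM (what is proved, stated in full; the proofs are below) =====
def Claim_equal_countGoodSubstringsWithStates : Prop := ∀ (s : String) (sub_len : Int), Dom_countGoodSubstringsWithStates s sub_len → Spec_countGoodSubstringsWithStates s sub_len (countGoodSubstringsWithStates s sub_len)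

-- ===== LEMMAS AND PROOFS =====

-- state represents the multiset of window w: unique keys, and get? c is exactly w.count c when positive.
def pvInv (state : PySem.Dict Char Int) (w : List Char) : Prop :=
  state.keys.Nodup ∧ ∀ c : Char, state.get? c = if w.count c = 0 then none else some ((w.count c : Int))

theorem pv_find?_filter_imp {α : Type} (l : List α) (p q : α → Bool)
    (h : ∀ x, p x = true → q x = true) : (l.filter q).find? p = l.find? p := by
  induction l with
  | nil => rfl
  | cons x xs ih =>
    by_cases hp : p x = true
    · simp [List.filter_cons, h x hp, List.find?_cons, hp]
    · simp only [Bool.not_eq_true] at hp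
      by_cases hq : q x = true <;> simp [List.filter_cons, hq, List.find?_cons, hp, ih]

theorem pv_get?_erase (d : PySem.Dict Char Int) (k x : Char) :
    (d.erase k).get? x = if x = k then none else d.get? x := by
  by_cases hx : x = k
  · subst hx
    simp only [PySem.Dict.erase, PySem.Dict.get?, if_pos rfl]
    have : List.find? (fun p => p.1 == x) (d.items.filter (fun p => !(p.1 == x))) = none := by
      apply List.find?_eq_none.mpr
      intro a ha
      have := List.of_mem_filter ha
      simpa using this
    simp [this]
  · simp only [PySem.Dict.erase, PySem.Dict.get?, if_neg hx]
    rw [pv_find?_filter_imp]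
    intro z hz
    have : z.1 = x := by simpa using hz
    simp [this, hx]

theorem pv_nodup_keys_erase (d : PySem.Dict Char Int) (k : Char) (h : d.keys.Nodup) :
    (d.erase k).keys.Nodup := by
  have hsub : (d.erase k).keys.Sublist d.keys := by
    simpa [PySem.Dict.erase, PySem.Dict.keys] using
      List.Sublist.map (fun p : Char × Int => p.1)
        (@List.filter_sublist _ (fun p => !(p.1 == k)) d.items)
  exact h.sublist hsub

theorem pv_size_of_inv (state : PySem.Dict Char Int) (w : List Char)
    (h : pvInv state w) : state.size = (PySem.Set.ofList w).length := by
  obtain ⟨hnd, hget⟩ := h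
  have hperm : state.keys.Perm (PySem.Set.ofList w) := by
    rw [List.perm_ext_iff_of_nodup hnd (PySem.Set.nodup_ofList w)]
    intro c
    rw [PySem.Set.mem_ofList]
    constructor
    · intro hc
      have hne : state.get? c ≠ none := fun heq =>
        (PySem.Dict.get?_eq_none_iff_not_mem_keys state c).mp heq hc
      rw [hget c] at hne
      by_cases h0 : w.count c = 0
      · simp [h0] at hne
      · exact List.count_pos_iff.mp (Nat.pos_of_ne_zero h0)
    · intro hc
      have h0 : w.count c ≠ 0 := Nat.pos_iff_ne_zero.mp (List.count_pos_iff.mpr hc)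
      by_contra hnk
      have heq : state.get? c = none :=
        (PySem.Dict.get?_eq_none_iff_not_mem_keys state c).mpr hnk
      rw [hget c] at heq
      simp [h0] at heq
  have : state.keys.length = (PySem.Set.ofList w).length := hperm.length_eq
  simpa [PySem.Dict.size, PySem.Dict.keys] using this

theorem pv_inv_empty : pvInv PySem.Dict.empty [] := by
  constructor
  · simp [PySem.Dict.empty, PySem.Dict.keys]
  · intro c; simp [PySem.Dict.get?_empty]

theorem pv_inv_push (state : PySem.Dict Char Int) (w : List Char) (c : Char)
    (h : pvInv state w) :
    pvInv (if (state.get? c).isSome then state.modify c 0 (· + 1) else state.insert c 1)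
      (w ++ [c]) := by
  obtain ⟨hnd, hget⟩ := h
  by_cases hc : w.count c = 0
  · have hnone : state.get? c = none := by rw [hget c]; simp [hc]
    rw [hnone]
    simp only [Option.isSome_none, Bool.false_eq_true, if_false]
    refine ⟨PySem.Dict.nodup_keys_insert state c 1 hnd, ?_⟩
    intro x
    rw [PySem.Dict.get?_insert]
    by_cases hx : x = c
    · subst hx; simp [hc]
    · have hcx : ¬ c = x := fun h => hx h.symm
      rw [if_neg hx, hget x]
      simp [List.count_append, hcx]
  · have hsome : state.get? c = some ((w.count c : Int)) := by rw [hget c]; simp [hc]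
    rw [hsome]
    simp only [Option.isSome_some, if_true, PySem.Dict.modify]
    have hgetD : state.getD c 0 = (w.count c : Int) :=
      PySem.Dict.getD_of_get?_eq_some state 0 hsome
    refine ⟨PySem.Dict.nodup_keys_insert state c _ hnd, ?_⟩
    intro x
    rw [PySem.Dict.get?_insert]
    by_cases hx : x = c
    · subst hx
      rw [if_pos rfl, hgetD]
      simp [List.count_append, hc]
    · have hcx : ¬ c = x := fun h => hx h.symm
      rw [if_neg hx, hget x]
      simp [List.count_append, hcx]

theorem pv_inv_pop (state : PySem.Dict Char Int) (d : Char) (t : List Char)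
    (h : pvInv state (d :: t)) :
    pvInv (if (state.modify d 0 (· - 1)).getD d 0 == 0
             then (state.modify d 0 (· - 1)).erase d
             else state.modify d 0 (· - 1)) t := by
  obtain ⟨hnd, hget⟩ := h
  have hcd : (d :: t).count d = t.count d + 1 := by simp [List.count_cons]
  have hsome : state.get? d = some (((d :: t).count d : Int)) := by
    rw [hget d]; simp [hcd]
  have hgetD : state.getD d 0 = ((d :: t).count d : Int) :=
    PySem.Dict.getD_of_get?_eq_some state 0 hsome
  have hmod : state.modify d 0 (· - 1) = state.insert d ((t.count d : Int)) := by
    rw [PySem.Dict.modify, hgetD, hcd]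
    push_cast
    ring_nf
  rw [hmod]
  have hndi : (state.insert d ((t.count d : Int))).keys.Nodup :=
    PySem.Dict.nodup_keys_insert state d _ hnd
  have hgetDi : (state.insert d ((t.count d : Int))).getD d 0 = (t.count d : Int) :=
    PySem.Dict.getD_insert_self state d _ 0
  by_cases h0 : t.count d = 0
  · rw [if_pos (by simp [hgetDi, h0])]
    refine ⟨pv_nodup_keys_erase _ d hndi, ?_⟩
    intro x
    rw [pv_get?_erase]
    by_cases hx : x = d
    · subst hx; simp [h0]
    · rw [if_neg hx, PySem.Dict.get?_insert, if_neg hx, hget x]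
      have hdx : ¬ d = x := fun h => hx h.symm
      simp [List.count_cons, hx, hdx]
  · rw [if_neg (by simp [hgetDi]; exact_mod_cast h0)]
    refine ⟨hndi, ?_⟩
    intro x
    rw [PySem.Dict.get?_insert]
    by_cases hx : x = d
    · subst hx; simp [h0]
    · rw [if_neg hx, hget x]
      have hdx : ¬ d = x := fun h => hx h.symm
      simp [List.count_cons, hx, hdx]

-- window predicate B tests at start index i (kn = sub_len)
def pvGoodB (cs : List Char) (kn : Nat) (i : Int) : Bool :=
  ((PySem.Set.ofList (PySem.List.slice cs (some i) (some (i + (kn : Int))))).length : Int)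
    == (kn : Int)

-- main loop invariant lemma: the remaining fold adds exactly B's count of good windows starting ≥ l
theorem pv_loopA (cs : List Char) (kn : Nat) (hk : 1 ≤ kn) :
    ∀ (f p : Nat), cs.length - p = f → p ≤ cs.length →
    ∀ (state : PySem.Dict Char Int) (count : Int) (l : Nat), l = p + 1 - kn →
    pvInv state ((cs.take p).drop l) →
    ((PySem.List.enumerate (cs.drop p) p).foldl (pvStepA cs (kn : Int)) (state, count, (l : Int))).2.1
      = count + (((PySem.List.pyRange (l : Int) ((cs.length : Int) - (kn : Int) + 1) 1).filter
          (pvGoodB cs kn)).length : Int) := by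
  intro f
  induction f with
  | zero =>
    intro p hf hp state count l hl hInv
    have hpn : p = cs.length := by omega
    subst hpn
    have hnil : PySem.List.pyRange (l : Int) ((cs.length : Int) - (kn : Int) + 1) 1 = [] := by
      simp [PySem.List.pyRange]
      omega
    simp [List.drop_length, PySem.List.enumerate_nil, hnil]
  | succ f ih =>
    intro p hf hp state count l hl hInv
    have hpn : p < cs.length := by omega
    rw [List.drop_eq_getElem_cons hpn, PySem.List.enumerate_cons, List.foldl_cons]
    have hlp : l ≤ p := by omega
    have hw : (cs.take (p + 1)).drop l = (cs.take p).drop l ++ [cs[p]] := by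
      rw [List.take_add_one, List.drop_append_of_le_length (by simp [List.length_take]; omega)]
      simp [List.getElem?_eq_getElem hpn]
    have hInv1 := pv_inv_push state _ cs[p] hInv
    rw [← hw] at hInv1
    by_cases hcase : kn ≤ p + 1
    · -- the window is full: A counts and slides
      have hcond : ((p : Int) - (l : Int) + 1 == (kn : Int)) = true := by
        simp only [beq_iff_eq]
        omega
      have hlt : l < cs.length := by omega
      have hlc : (PySem.List.pyGet? cs (l : Int)).getD ' ' = cs[l] := by
        rw [PySem.List.pyGet?_natCast, List.getElem?_eq_getElem hlt]
        rfl
      have hltake : l < (cs.take (p + 1)).length := by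
        simp [List.length_take]
        omega
      have hwt : (cs.take (p + 1)).drop l = cs[l] :: (cs.take (p + 1)).drop (l + 1) := by
        rw [List.drop_eq_getElem_cons hltake, List.getElem_take]
      -- the full window equals B's slice at start l
      have hkpl : kn = p + 1 - l := by omega
      have hslice : PySem.List.slice cs (some (l : Int)) (some ((l : Int) + (kn : Int)))
          = (cs.take (p + 1)).drop l := by
        rw [PySem.List.slice_natCast_add, List.drop_take, hkpl]
      have hgood : pvGoodB cs kn (l : Int)
          = (((if (state.get? cs[p]).isSome then state.modify cs[p] 0 (· + 1)
              else state.insert cs[p] 1).size : Int) == (kn : Int)) := by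
        unfold pvGoodB
        rw [hslice, ← pv_size_of_inv _ _ hInv1]
      rw [hwt] at hInv1
      have hInv2 := pv_inv_pop _ _ _ hInv1
      -- unfold one step of A
      simp only [pvStepA, hcond, if_true, hlc]
      have hcast : (l : Int) + 1 = ((l + 1 : Nat) : Int) := by push_cast; ring
      have hcastp : (p : Int) + 1 = ((p + 1 : Nat) : Int) := by push_cast; ring
      rw [hcast, hcastp]
      rw [ih (p + 1) (by omega) (by omega) _ _ (l + 1) (by omega) hInv2]
      -- split the head index l off B's range
      have hrange : PySem.List.pyRange (l : Int) ((cs.length : Int) - (kn : Int) + 1) 1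
          = (l : Int) :: PySem.List.pyRange ((l : Int) + 1) ((cs.length : Int) - (kn : Int) + 1) 1 := by
        exact PySem.List.pyRange_one_cons (by omega)
      rw [hrange, List.filter_cons, hgood, hcast]
      by_cases hb : (((if (state.get? cs[p]).isSome then state.modify cs[p] 0 (· + 1)
          else state.insert cs[p] 1).size : Int) == (kn : Int)) = true
      · rw [hb]
        simp only [if_true, List.length_cons]
        push_cast
        ring
      · rw [Bool.not_eq_true] at hb
        rw [hb]
        simp
    · -- the window is not yet full: A only extends it
      have hl0 : l = 0 := by omega
      have hcond : ((p : Int) - (l : Int) + 1 == (kn : Int)) = false := by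
        simp only [beq_eq_false_iff_ne, ne_eq]
        omega
      simp only [pvStepA, hcond, Bool.false_eq_true, if_false]
      exact ih (p + 1) (by omega) (by omega) _ _ l (by omega) hInv1

theorem pv_loopA_neg (cs : List Char) (k : Int) (hk : k ≤ 0) :
    ∀ (xs : List Char) (start : Int), 0 ≤ start →
    ∀ (state : PySem.Dict Char Int) (count : Int),
    ((PySem.List.enumerate xs start).foldl (pvStepA cs k) (state, count, 0)).2.1 = count := by
  intro xs
  induction xs with
  | nil => intro start _ state count; simp [PySem.List.enumerate_nil]
  | cons x xs ih =>
    intro start hs state count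
    rw [PySem.List.enumerate_cons, List.foldl_cons]
    have hcond : (start - 0 + 1 == k) = false := by
      simp only [beq_eq_false_iff_ne, ne_eq]
      omega
    simp only [pvStepA, hcond, Bool.false_eq_true, if_false]
    exact ih (start + 1) (by omega) _ count

-- ===== VERDICT (by name: the statement is the Claim_ definition above) =====
theorem countGoodSubstringsWithStates_spec : Claim_equal_countGoodSubstringsWithStates := by
  intro s sub_len _
  unfold Spec_countGoodSubstringsWithStates countGoodSubstringsWithStates countGoodSubstringsWithStates_alt
  by_cases hk : sub_len ≤ 0
  · rw [if_pos hk]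
    exact pv_loopA_neg s.toList sub_len hk s.toList 0 (by omega) PySem.Dict.empty 0
  · rw [if_neg hk]
    rw [Int.not_le] at hk
    obtain ⟨kn, rfl⟩ : ∃ kn : Nat, sub_len = (kn : Int) := ⟨sub_len.toNat, by omega⟩
    have h1 : 1 ≤ kn := by exact_mod_cast hk
    have hmain := pv_loopA s.toList kn h1 s.toList.length 0 (by omega) (by omega)
      PySem.Dict.empty 0 0 (by omega) (by simpa using pv_inv_empty)
    simp only [List.drop_zero, Nat.cast_zero] at hmain
    rw [hmain, zero_add]
    rfl
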